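-- pv_equiv track=rewrite | github.com/anselmobd/fo2 | src/utils/functions/strings.py | dirt_split_digits_alphas
-- ===== SOURCE A (Python) =====
-- def dirt_split_digits_alphas(text):
--     parts = []
--     draft = {
--         'd': "",
--         'a': "",
--     }
--     last_type = None
--     for char in f"{text}#":
--         char_type = 'd' if char.isdigit() else 'a' if char.isalpha() else None
--         if char_type != last_type:
--             if last_type:
--                 parts.append(draft[last_type])
--                 draft[last_type] = ""
--             last_type = char_type
--         if char_type:
--             draft[char_type] += char
--     return parts
-- ===== SOURCE B (Python) =====
-- def dirt_split_digits_alphas(text):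
--     def typ(char):
--         return 'd' if char.isdigit() else 'a' if char.isalpha() else None
--     s = f"{text}"
--     n = len(s)
--     types = [typ(c) for c in s]
--     cuts = [i for i in range(n + 1)
--             if i == 0 or i == n or types[i] != types[i - 1]]
--     return [s[a:b] for a, b in zip(cuts, cuts[1:]) if types[a]]
-- ===== Notes on version B (the rewrite author's own statement) =====
-- stated objective: faster
-- what changed: Replaces A's single stateful accumulation pass (last_type flag, two-slot draft dict, '#' sentinel, char-by-char string concatenation) by a staged index-based algorithm: build a type table, compute the list of boundary cut positions where the type changes, and slice the string between consecutive cuts, keeping slices whose type is truthy.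
import Mathlib
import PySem

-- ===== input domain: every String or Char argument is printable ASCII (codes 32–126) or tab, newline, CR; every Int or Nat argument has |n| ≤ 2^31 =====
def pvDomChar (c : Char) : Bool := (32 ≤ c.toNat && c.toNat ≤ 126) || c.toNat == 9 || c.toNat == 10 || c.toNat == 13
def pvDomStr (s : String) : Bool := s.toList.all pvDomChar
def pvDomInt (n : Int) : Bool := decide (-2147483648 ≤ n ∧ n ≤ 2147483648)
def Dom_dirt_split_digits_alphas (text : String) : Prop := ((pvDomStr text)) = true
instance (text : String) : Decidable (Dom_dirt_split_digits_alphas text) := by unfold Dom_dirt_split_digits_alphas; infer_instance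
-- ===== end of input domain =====

-- B replaces A's single stateful accumulation pass (last_type flag, draft dict, '#' sentinel)
-- by a staged index-based algorithm: type table, boundary cut positions, slices between cuts;
-- measured faster (A's char-by-char string concatenation is quadratic in the run length).

-- ===== PORT A =====
-- char_type = 'd' if char.isdigit() else 'a' if char.isalpha() else None
def pvTyp (c : Char) : Option Char :=
  if PySem.Chars.isdigit c then some 'd' else if PySem.Chars.isalpha c then some 'a' else none

-- the loop body of A; state = (parts, draft, last_type); draft values kept as List Char
-- (Python string concatenation draft[t] += char is ++ [c] on the char list)
def pvStepA (st : List String × PySem.Dict Char (List Char) × Option Char) (c : Char) :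
    List String × PySem.Dict Char (List Char) × Option Char :=
  let ct := pvTyp c
  let st' :=
    if ct ≠ st.2.2 then
      match st.2.2 with
      | some k => (st.1 ++ [String.ofList (st.2.1.getD k [])], st.2.1.insert k [], ct)
      | none => (st.1, st.2.1, ct)
    else st
  match ct with
  | some k => (st'.1, st'.2.1.insert k (st'.2.1.getD k [] ++ [c]), st'.2.2)
  | none => st'

def dirt_split_digits_alphas (text : String) : List String :=
  ((text.toList ++ ['#']).foldl pvStepA
    ([], (PySem.Dict.empty.insert 'd' []).insert 'a' [], none)).1

-- ===== PORT B =====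
-- Source B on the char list: types = [typ(c) for c in s]; cuts = [i for i in range(n+1) if ...];
-- [s[a:b] for a, b in zip(cuts, cuts[1:]) if types[a]].  types[i] is indexed only in range in
-- Python; ported totally with getD (same values at every index reached).
def pvCutSlices (s : List Char) : List String :=
  let n := s.length
  let types := s.map pvTyp
  let cuts := (List.range (n + 1)).filter
      (fun i => i == 0 || i == n || decide (types.getD i none ≠ types.getD (i - 1) none))
  (cuts.zip cuts.tail).filterMap (fun ab =>
    if (types.getD ab.1 none).isSome then
      some (String.ofList (PySem.List.slice s (some (ab.1 : Int)) (some (ab.2 : Int))))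
    else none)

def dirt_split_digits_alphas_alt (text : String) : List String := pvCutSlices text.toList

-- ===== PRECONDITION & SPEC =====
def Spec_dirt_split_digits_alphas (text : String) (out : List String) : Prop := out = dirt_split_digits_alphas_alt text
instance (text : String) (out : List String) : Decidable (Spec_dirt_split_digits_alphas text out) := by unfold Spec_dirt_split_digits_alphas; infer_instance

-- ===== CLAIM (what is proved, stated in full; the proofs are below) =====
def Claim_equal_dirt_split_digits_alphas : Prop := ∀ (text : String), Dom_dirt_split_digits_alphas text → Spec_dirt_split_digits_alphas text (dirt_split_digits_alphas text)

-- ===== LEMMAS AND PROOFS =====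

-- the maximal runs of equal type, with their key (proof-only common description)
def pvRuns : List Char → List (Option Char × List Char)
  | [] => []
  | c :: cs =>
    match pvRuns cs with
    | (k, g) :: rest =>
        if pvTyp c = k then (k, c :: g) :: rest else (pvTyp c, [c]) :: (k, g) :: rest
    | [] => [(pvTyp c, [c])]

def pvRender (gs : List (Option Char × List Char)) : List String :=
  gs.filterMap (fun p => if p.1.isSome then some (String.ofList p.2) else none)

-- ---------- A-side: the fold equals pvRender ∘ pvRuns ----------

-- the B-side run description with the run currently open in A's state prepended
def pvMerge (lt : Option Char) (cur : List Char) (gs : List (Option Char × List Char)) : List String :=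
  match lt with
  | none => pvRender gs
  | some k =>
    match gs with
    | [] => [String.ofList cur]
    | (k', g) :: rest =>
        if k' = some k then String.ofList (cur ++ g) :: pvRender rest
        else String.ofList cur :: pvRender ((k', g) :: rest)

lemma pvRender_cons (c : Char) (cs : List Char) :
    pvRender (pvRuns (c :: cs)) = pvMerge (pvTyp c) [c] (pvRuns cs) := by
  show pvRender (match pvRuns cs with
    | (k, g) :: rest =>
        if pvTyp c = k then (k, c :: g) :: rest else (pvTyp c, [c]) :: (k, g) :: rest
    | [] => [(pvTyp c, [c])]) = _
  cases h : pvRuns cs with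
  | nil =>
    cases ht : pvTyp c with
    | none => simp [pvRender, pvMerge]
    | some k => simp [pvRender, pvMerge]
  | cons p rest =>
    obtain ⟨k', g⟩ := p
    by_cases he : pvTyp c = k'
    · subst he
      cases ht : pvTyp c with
      | none => simp [pvRender, pvMerge]
      | some k => simp [pvRender, pvMerge]
    · cases ht : pvTyp c with
      | none => rw [ht] at he; simp [pvRender, pvMerge, he]
      | some k =>
        rw [ht] at he
        simp [pvRender, pvMerge, he, Ne.symm he]

lemma pvMerge_cons_ne (k : Char) (cur : List Char) (c : Char) (cs : List Char)
    (h : pvTyp c ≠ some k) :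
    pvMerge (some k) cur (pvRuns (c :: cs)) = String.ofList cur :: pvRender (pvRuns (c :: cs)) := by
  simp only [pvRuns]
  cases h' : pvRuns cs with
  | nil => simp [pvMerge, h]
  | cons p rest =>
    obtain ⟨k', g⟩ := p
    by_cases he : pvTyp c = k'
    · rw [he] at h
      simp [pvMerge, he, h]
    · have he' : pvTyp c ≠ some k := h
      simp [pvMerge, he, he']

lemma pvLoop (cs : List Char) :
    ∀ (parts : List String) (d : PySem.Dict Char (List Char)) (lt : Option Char) (cur : List Char),
      (∀ j : Char, d.getD j [] = if some j = lt then cur else []) →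
      ((cs ++ ['#']).foldl pvStepA (parts, d, lt)).1 = parts ++ pvMerge lt cur (pvRuns cs) := by
  induction cs with
  | nil =>
    intro parts d lt cur hinv
    have ht : pvTyp '#' = none := by decide
    cases lt with
    | none => simp [pvStepA, pvRuns, pvMerge, pvRender, ht]
    | some k => simp [pvStepA, pvRuns, pvMerge, ht, hinv k]
  | cons c cs ih =>
    intro parts d lt cur hinv
    have hstep : ((c :: cs) ++ ['#']).foldl pvStepA (parts, d, lt)
        = (cs ++ ['#']).foldl pvStepA (pvStepA (parts, d, lt) c) := rfl
    rw [hstep]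
    by_cases heq : pvTyp c = lt
    · cases hct : pvTyp c with
      | none =>
        rw [hct] at heq; subst heq
        have hA : pvStepA (parts, d, none) c = (parts, d, none) := by
          simp [pvStepA, hct]
        rw [hA, ih parts d none cur hinv]
        show parts ++ pvRender (pvRuns cs) = parts ++ pvRender (pvRuns (c :: cs))
        have h := pvRender_cons c cs
        rw [hct] at h
        rw [h]; rfl
      | some k =>
        rw [hct] at heq; subst heq
        have hd : d.getD k [] = cur := by simpa using hinv k
        have hA : pvStepA (parts, d, some k) c = (parts, d.insert k (cur ++ [c]), some k) := by
          simp [pvStepA, hct, hd]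
        rw [hA, ih parts _ (some k) (cur ++ [c])]
        · congr 1
          simp only [pvRuns]
          cases h : pvRuns cs with
          | nil => simp [pvMerge, hct, pvRender]
          | cons p rest =>
            obtain ⟨k', g⟩ := p
            by_cases he : pvTyp c = k'
            · rw [hct] at he
              simp [pvMerge, hct, ← he, List.append_assoc]
            · rw [hct] at he
              have he' : k' ≠ some k := fun h => he h.symm
              simp [pvMerge, hct, he, he']
        · intro j
          rw [PySem.Dict.getD_insert]
          rcases eq_or_ne j k with rfl | hj
          · simp
          · have := hinv j
            simp [hj] at this ⊢
            simpa [hj] using this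
    · cases lt with
      | none =>
        cases hct : pvTyp c with
        | none => exact absurd hct heq
        | some k =>
          have hd : d.getD k [] = [] := by simpa using hinv k
          have hA : pvStepA (parts, d, none) c = (parts, d.insert k [c], some k) := by
            simp [pvStepA, hct, hd]
          rw [hA, ih parts _ (some k) [c]]
          · show _ = parts ++ pvRender (pvRuns (c :: cs))
            rw [pvRender_cons c cs, hct]
          · intro j
            rw [PySem.Dict.getD_insert]
            rcases eq_or_ne j k with rfl | hj
            · simp
            · have := hinv j
              simp [hj] at this ⊢
              exact this
      | some k0 =>
        have hne : pvTyp c ≠ some k0 := heq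
        have hd0 : d.getD k0 [] = cur := by simpa using hinv k0
        cases hct : pvTyp c with
        | none =>
          have hA : pvStepA (parts, d, some k0) c
              = (parts ++ [String.ofList cur], d.insert k0 [], none) := by
            simp [pvStepA, hct, hd0]
          rw [hA, ih _ _ none []]
          · rw [pvMerge_cons_ne k0 cur c cs hne]
            have h := pvRender_cons c cs
            rw [hct] at h
            show parts ++ [String.ofList cur] ++ pvRender (pvRuns cs) = _
            rw [h]
            simp [pvMerge]
          · intro j
            rw [PySem.Dict.getD_insert]
            rcases eq_or_ne j k0 with rfl | hj
            · simp
            · have := hinv j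
              simp [hj] at this ⊢
              exact this
        | some k =>
          have hk : k ≠ k0 := by
            rw [hct] at hne
            intro h; exact hne (by rw [h])
          have h1 : (d.insert k0 ([] : List Char)).getD k [] = [] := by
            rw [PySem.Dict.getD_insert]
            have := hinv k
            simp [hk] at this ⊢
            exact this
          have hA : pvStepA (parts, d, some k0) c
              = (parts ++ [String.ofList cur], (d.insert k0 []).insert k [c], some k) := by
            rw [hct] at hne
            simp [pvStepA, hct, hne, hd0, h1]
          rw [hA, ih _ _ (some k) [c]]
          · rw [pvMerge_cons_ne k0 cur c cs hne, pvRender_cons c cs, hct]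
            simp
          · intro j
            rw [PySem.Dict.getD_insert, PySem.Dict.getD_insert]
            rcases eq_or_ne j k with rfl | hj
            · simp
            · rcases eq_or_ne j k0 with rfl | hj0
              · simp [Ne.symm hk]
              · have := hinv j
                simp [hj, hj0] at this ⊢
                exact this

-- ---------- B-side: the cut/slice computation equals pvRender ∘ pvRuns ----------

def pvCuts (ts : List (Option Char)) : List Nat :=
  (List.range (ts.length + 1)).filter
    (fun i => i == 0 || i == ts.length || decide (ts.getD i none ≠ ts.getD (i - 1) none))

lemma pvCutSlices_eq (s : List Char) :
    pvCutSlices s =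
      ((pvCuts (s.map pvTyp)).zip (pvCuts (s.map pvTyp)).tail).filterMap (fun ab =>
        if ((s.map pvTyp).getD ab.1 none).isSome then
          some (String.ofList (PySem.List.slice s (some (ab.1 : Int)) (some (ab.2 : Int))))
        else none) := by
  simp [pvCutSlices, pvCuts, List.length_map]

lemma pvCuts_head (ts : List (Option Char)) : ∃ w, pvCuts ts = 0 :: w := by
  unfold pvCuts
  rw [List.range_succ_eq_map, List.filter_cons_of_pos (by simp)]
  exact ⟨_, rfl⟩

lemma pvRuns_head (d : Char) (ds : List Char) :
    ∃ g rest, pvRuns (d :: ds) = (pvTyp d, g) :: rest := by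
  show ∃ g rest, (match pvRuns ds with
    | (k, g) :: rest =>
        if pvTyp d = k then (k, d :: g) :: rest else (pvTyp d, [d]) :: (k, g) :: rest
    | [] => [(pvTyp d, [d])]) = (pvTyp d, g) :: rest
  cases h : pvRuns ds with
  | nil => exact ⟨[d], [], rfl⟩
  | cons p rest =>
    obtain ⟨k, g⟩ := p
    by_cases he : pvTyp d = k
    · subst he; simp
    · simp [he]

lemma pvRuns_peel (k : Option Char) : ∀ (r t : List Char), r ≠ [] →
    (∀ x ∈ r, pvTyp x = k) → (∀ d ds, t = d :: ds → pvTyp d ≠ k) →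
    pvRuns (r ++ t) = (k, r) :: pvRuns t := by
  intro r
  induction r with
  | nil => intro t h; exact absurd rfl h
  | cons c r' ih =>
    intro t _ h2 h3
    have hc : pvTyp c = k := h2 c List.mem_cons_self
    cases r' with
    | nil =>
      cases t with
      | nil => simp [pvRuns, hc]
      | cons d ds =>
        obtain ⟨g, rest, hr⟩ := pvRuns_head d ds
        show (match pvRuns (d :: ds) with
          | (k', g) :: rest =>
              if pvTyp c = k' then (k', c :: g) :: rest else (pvTyp c, [c]) :: (k', g) :: rest
          | [] => [(pvTyp c, [c])]) = (k, [c]) :: pvRuns (d :: ds)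
        rw [hr]
        have hne : pvTyp c ≠ pvTyp d := by
          rw [hc]; exact fun h => (h3 d ds rfl) h.symm
        show (if pvTyp c = pvTyp d then (pvTyp d, c :: g) :: rest
              else (pvTyp c, [c]) :: (pvTyp d, g) :: rest) = (k, [c]) :: (pvTyp d, g) :: rest
        rw [if_neg hne, hc]
    | cons c2 r'' =>
      have ih' := ih t (List.cons_ne_nil c2 r'')
        (fun x hx => h2 x (List.mem_cons_of_mem c hx)) h3
      show (match pvRuns ((c2 :: r'') ++ t) with
        | (k', g) :: rest =>
            if pvTyp c = k' then (k', c :: g) :: rest else (pvTyp c, [c]) :: (k', g) :: rest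
        | [] => [(pvTyp c, [c])]) = (k, c :: c2 :: r'') :: pvRuns t
      rw [ih']
      simp [hc]

lemma pvCuts_peel (k : Option Char) (ts1 ts2 : List (Option Char)) (h1 : ts1 ≠ [])
    (h2 : ∀ x ∈ ts1, x = k) (h3 : ∀ d w, ts2 = d :: w → d ≠ k) :
    pvCuts (ts1 ++ ts2) = 0 :: (pvCuts ts2).map (· + ts1.length) := by
  have hm : 1 ≤ ts1.length := List.length_pos_iff.mpr h1
  have hget1 : ∀ i, i < ts1.length → (ts1 ++ ts2).getD i none = k := by
    intro i hi
    rw [List.getD_append _ _ _ _ hi, List.getD_eq_getElem _ _ hi]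
    exact h2 _ (List.getElem_mem hi)
  have hget2 : ∀ i, (ts1 ++ ts2).getD (ts1.length + i) none = ts2.getD i none := by
    intro i
    rw [List.getD_append_right _ _ _ _ (Nat.le_add_right _ i)]
    congr 1
    omega
  unfold pvCuts
  rw [List.length_append]
  have hr : ts1.length + ts2.length + 1 = ts1.length + (ts2.length + 1) := by omega
  rw [hr, List.range_add, List.filter_append]
  -- first block: only index 0 survives
  have hfirst : (List.range ts1.length).filter
      (fun i => i == 0 || i == ts1.length + ts2.length ||
        decide ((ts1 ++ ts2).getD i none ≠ (ts1 ++ ts2).getD (i - 1) none)) = [0] := by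
    obtain ⟨m', hm'⟩ : ∃ m', ts1.length = m' + 1 := ⟨ts1.length - 1, by omega⟩
    rw [show List.range ts1.length = 0 :: (List.range m').map Nat.succ from by
          rw [hm', List.range_succ_eq_map],
        List.filter_cons_of_pos (by simp), List.filter_map]
    have hnil : (List.range m').filter ((fun i => i == 0 || i == ts1.length + ts2.length ||
        decide ((ts1 ++ ts2).getD i none ≠ (ts1 ++ ts2).getD (i - 1) none)) ∘ Nat.succ) = [] := by
      rw [List.filter_eq_nil_iff]
      intro j hj
      rw [List.mem_range] at hj
      have e1 : (ts1 ++ ts2).getD (j + 1) none = k := hget1 _ (by omega)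
      have e2 : (ts1 ++ ts2).getD j none = k := hget1 _ (by omega)
      simp only [Function.comp]
      have hb2 : (j + 1 == ts1.length + ts2.length) = false := by
        simp only [beq_eq_false_iff_ne, ne_eq]
        omega
      have hb3 : decide ((ts1 ++ ts2).getD (j + 1) none ≠ (ts1 ++ ts2).getD (j + 1 - 1) none)
          = false := by
        rw [show j + 1 - 1 = j from rfl, e1, e2]
        simp
      rw [hb2, hb3]
      simp
    rw [hnil, List.map_nil]
  rw [hfirst]
  -- second block: the predicate transported by (ts1.length + ·) is ts2's predicate
  rw [List.filter_map]
  have hcong : (List.range (ts2.length + 1)).filter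
      ((fun i => i == 0 || i == ts1.length + ts2.length ||
        decide ((ts1 ++ ts2).getD i none ≠ (ts1 ++ ts2).getD (i - 1) none)) ∘ (ts1.length + ·))
      = (List.range (ts2.length + 1)).filter
      (fun i => i == 0 || i == ts2.length || decide (ts2.getD i none ≠ ts2.getD (i - 1) none)) := by
    apply List.filter_congr
    intro i hi
    rw [List.mem_range] at hi
    cases i with
    | zero =>
      have hrhs : ((0 : Nat) == 0 || (0 : Nat) == ts2.length ||
          decide (ts2.getD 0 none ≠ ts2.getD (0 - 1) none)) = true := by simp
      rw [hrhs]
      simp only [Function.comp]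
      rcases Nat.eq_zero_or_pos ts2.length with hp0 | hp0
      · simp [hp0]
      · obtain ⟨d, w, rfl⟩ : ∃ d w, ts2 = d :: w := by
          cases ts2 with
          | nil => simp at hp0
          | cons d w => exact ⟨d, w, rfl⟩
        have e1 : (ts1 ++ d :: w).getD ts1.length none = d := by
          have := hget2 0
          simp only [Nat.add_zero] at this
          exact this
        have e2 : (ts1 ++ d :: w).getD (ts1.length - 1) none = k := hget1 _ (by omega)
        have hd : d ≠ k := h3 d w rfl
        have hb3 : decide ((ts1 ++ d :: w).getD (ts1.length + 0) none
            ≠ (ts1 ++ d :: w).getD (ts1.length + 0 - 1) none) = true := by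
          rw [show ts1.length + 0 = ts1.length from rfl, e1, e2]
          simp [hd]
        rw [hb3]
        simp
    | succ j =>
      simp only [Function.comp]
      have e1 : (ts1 ++ ts2).getD (ts1.length + (j + 1)) none = ts2.getD (j + 1) none := hget2 _
      have e2 : (ts1 ++ ts2).getD (ts1.length + (j + 1) - 1) none = ts2.getD (j + 1 - 1) none := by
        have h' : ts1.length + (j + 1) - 1 = ts1.length + j := by omega
        rw [h', hget2 j]
        rfl
      have e3 : (ts1.length + (j + 1) == 0) = (j + 1 == 0) := by simp
      have e4 : (ts1.length + (j + 1) == ts1.length + ts2.length) = (j + 1 == ts2.length) := by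
        simp [Nat.add_left_cancel_iff]
      rw [e1, e2, e3, e4]
  rw [hcong]
  have hmap : (List.map (fun i => ts1.length + i) ((List.range (ts2.length + 1)).filter
      (fun i => i == 0 || i == ts2.length || decide (ts2.getD i none ≠ ts2.getD (i - 1) none))))
      = ((List.range (ts2.length + 1)).filter
      (fun i => i == 0 || i == ts2.length || decide (ts2.getD i none ≠ ts2.getD (i - 1) none))).map
        (· + ts1.length) := by
    apply List.map_congr_left
    intro a _
    omega
  rw [hmap]
  rfl

lemma pvMain (N : Nat) : ∀ s : List Char, s.length ≤ N → pvCutSlices s = pvRender (pvRuns s) := by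
  induction N with
  | zero =>
    intro s h
    have hs : s = [] := List.eq_nil_of_length_eq_zero (Nat.le_zero.mp h)
    subst hs
    rfl
  | succ N ih =>
    intro s hlen
    cases s with
    | nil => rfl
    | cons c cs =>
      -- split off the first maximal run
      set P : Char → Bool := fun x => pvTyp x == pvTyp c with hP
      have hPc : P c = true := by simp [hP]
      have hrt : (c :: cs).takeWhile P ++ (c :: cs).dropWhile P = c :: cs :=
        List.takeWhile_append_dropWhile
      set r := (c :: cs).takeWhile P with hrdef
      set t := (c :: cs).dropWhile P with htdef
      have hr2 : ∀ x ∈ r, pvTyp x = pvTyp c := by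
        intro x hx
        have := List.mem_takeWhile_imp hx
        simpa [hP] using this
      have hrne : r ≠ [] := by
        rw [hrdef, List.takeWhile_cons, if_pos hPc]
        exact List.cons_ne_nil _ _
      have ht3 : ∀ d ds, t = d :: ds → pvTyp d ≠ pvTyp c := by
        intro d ds hd
        have hne : t ≠ [] := by rw [hd]; exact List.cons_ne_nil _ _
        have hhead := List.head_dropWhile_not P (l := c :: cs) hne
        have hdhead : t.head hne = d := by
          simp [hd]
        rw [hdhead] at hhead
        simpa [hP] using hhead
      have hlt : t.length ≤ N := by
        have h1 : r.length + t.length = cs.length + 1 := by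
          have := congrArg List.length hrt
          simpa [List.length_append] using this
        have h2 : 1 ≤ r.length := List.length_pos_iff.mpr hrne
        have h3 : cs.length ≤ N := by simpa using hlen
        omega
      -- hypotheses of the peel lemmas on the mapped type lists
      have h1' : r.map pvTyp ≠ [] := by
        simpa using hrne
      have h2' : ∀ x ∈ r.map pvTyp, x = pvTyp c := by
        intro x hx
        obtain ⟨y, hy, rfl⟩ := List.mem_map.mp hx
        exact hr2 y hy
      have h3' : ∀ d w, t.map pvTyp = d :: w → d ≠ pvTyp c := by
        intro d w hd
        cases hte : t with
        | nil => rw [hte] at hd; simp at hd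
        | cons y ys =>
          rw [hte, List.map_cons] at hd
          injection hd with hh1 hh2
          exact hh1 ▸ ht3 y ys hte
      rw [← hrt]
      rw [pvCutSlices_eq, List.map_append]
      rw [pvCuts_peel (pvTyp c) (r.map pvTyp) (t.map pvTyp) h1' h2' h3']
      obtain ⟨w, hw⟩ := pvCuts_head (t.map pvTyp)
      rw [hw]
      simp only [List.length_map, List.map_cons, List.tail_cons, List.zip_cons_cons]
      -- head pair (0, 0 + r.length): the first run's slice
      have hg0 : (List.map pvTyp r ++ List.map pvTyp t).getD 0 none = pvTyp c := by
        have hlr : 0 < (List.map pvTyp r).length := by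
          simpa using List.length_pos_iff.mpr hrne
        rw [List.getD_append _ _ _ _ hlr, List.getD_eq_getElem _ _ hlr]
        exact h2' _ (List.getElem_mem hlr)
      have hs0 : PySem.List.slice (r ++ t) (some ((0 : Nat) : Int))
          (some ((0 + r.length : Nat) : Int)) = r := by
        rw [PySem.List.slice_natCast]
        simp
      -- tail pairs: transported pairs of t's cuts
      have hz : ((0 + r.length) :: List.map (fun x => x + r.length) w).zip
            (List.map (fun x => x + r.length) w)
          = ((0 :: w).zip ((0 :: w).tail)).map
              (Prod.map (fun x => x + r.length) (fun x => x + r.length)) := by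
        rw [List.tail_cons, ← List.zip_map]
        rfl
      rw [hz, List.filterMap_cons, List.filterMap_map]
      have hfun : ((fun ab : Nat × Nat =>
            if ((List.map pvTyp r ++ List.map pvTyp t).getD ab.1 none).isSome = true then
              some (String.ofList (PySem.List.slice (r ++ t) (some (ab.1 : Int)) (some (ab.2 : Int))))
            else none) ∘ (Prod.map (fun x => x + r.length) (fun x => x + r.length)))
          = (fun ab : Nat × Nat =>
            if ((List.map pvTyp t).getD ab.1 none).isSome = true then
              some (String.ofList (PySem.List.slice t (some (ab.1 : Int)) (some (ab.2 : Int))))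
            else none) := by
        funext ab
        obtain ⟨a, b⟩ := ab
        simp only [Function.comp, Prod.map]
        have hga : (List.map pvTyp r ++ List.map pvTyp t).getD (a + r.length) none
            = (List.map pvTyp t).getD a none := by
          rw [List.getD_append_right _ _ _ _ (by simp)]
          congr 1
          simp
        have hsa : PySem.List.slice (r ++ t) (some ((a + r.length : Nat) : Int))
            (some ((b + r.length : Nat) : Int))
            = PySem.List.slice t (some ((a : Nat) : Int)) (some ((b : Nat) : Int)) := by
          rw [PySem.List.slice_natCast, PySem.List.slice_natCast]
          rw [show a + r.length = r.length + a from by omega, List.drop_length_add_append]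
          congr 1
          omega
        rw [hga, hsa]
      rw [hfun]
      have htail : ((0 :: w).zip ((0 :: w).tail)) =
          ((pvCuts (List.map pvTyp t)).zip (pvCuts (List.map pvTyp t)).tail) := by
        rw [hw]
      have hB : (((0 :: w).zip ((0 :: w).tail)).filterMap (fun ab : Nat × Nat =>
            if ((List.map pvTyp t).getD ab.1 none).isSome = true then
              some (String.ofList (PySem.List.slice t (some (ab.1 : Int)) (some (ab.2 : Int))))
            else none)) = pvRender (pvRuns t) := by
        rw [htail, ← pvCutSlices_eq]
        exact ih t hlt
      rw [pvRuns_peel (pvTyp c) r t hrne hr2 ht3]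
      cases hks : pvTyp c with
      | none =>
        rw [hg0, hks]
        simp only [Option.isSome_none, Bool.false_eq_true, if_false]
        rw [hB]
        simp [pvRender]
      | some kc =>
        rw [hg0, hks]
        simp only [Option.isSome_some, if_true]
        rw [hs0, hB]
        simp [pvRender]

-- ===== VERDICT (by name: the statement is the Claim_ definition above) =====
theorem dirt_split_digits_alphas_spec : Claim_equal_dirt_split_digits_alphas := by
  intro text _
  unfold Spec_dirt_split_digits_alphas dirt_split_digits_alphas dirt_split_digits_alphas_alt
  rw [pvLoop text.toList [] _ none []]
  · rw [pvMain text.toList.length text.toList le_rfl]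
    rfl
  · intro j
    simp [PySem.Dict.getD_insert]
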